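-- pv_equiv track=rewrite | github.com/IdzaYar/LesonS | HomeWork17.py | correct_sentence
-- ===== SOURCE A (Python) =====
-- def correct_sentence(text):
--     if not text.endswith('.'):
--         text = text.capitalize() + '.'
--     else:
--         text = text.capitalize()
--     words = text.split()
--     for i in range(len(words)):
--         if i > 0 and words[i - 1].endswith('.'):
--             words[i] = words[i].capitalize()
--     return ' '.join(words)
-- ===== SOURCE B (Python) =====
-- def correct_sentence(text):
--     if not text.endswith('.'):
--         text += '.'
--     words = text.split()
--     sentences = []
--     while words:
--         k = 0
--         while not words[k].endswith('.'):
--             k += 1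
--         sentences.append(words[:k + 1])
--         words = words[k + 1:]
--     return ' '.join(
--         ' '.join([s[0].capitalize()] + [w.lower() for w in s[1:]])
--         for s in sentences
--     )
-- ===== Notes on version B (the rewrite author's own statement) =====
-- stated objective: alternative
-- what changed: B normalizes the trailing period, then splits the word list into SENTENCE CHUNKS (each chunk ends at the first word ending with '.'), formats every sentence independently (first word capitalized, the rest lowercased) and joins the formatted sentences; A instead applies a global string capitalize() and then an index-based correction loop over words[i-1].
-- intended difference: On texts that begin with whitespace and whose first word starts with a letter, A's global capitalize() uppercases the leading whitespace position and leaves the first word lowercased (e.g. ' ab' -> 'ab.'), while B capitalizes the first word ('Ab.'); capitalizing the first sentence is the function's evident intent. — e.g. on correct_sentence(" ab"): A returns "ab.", B returns "Ab."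
import Mathlib
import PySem

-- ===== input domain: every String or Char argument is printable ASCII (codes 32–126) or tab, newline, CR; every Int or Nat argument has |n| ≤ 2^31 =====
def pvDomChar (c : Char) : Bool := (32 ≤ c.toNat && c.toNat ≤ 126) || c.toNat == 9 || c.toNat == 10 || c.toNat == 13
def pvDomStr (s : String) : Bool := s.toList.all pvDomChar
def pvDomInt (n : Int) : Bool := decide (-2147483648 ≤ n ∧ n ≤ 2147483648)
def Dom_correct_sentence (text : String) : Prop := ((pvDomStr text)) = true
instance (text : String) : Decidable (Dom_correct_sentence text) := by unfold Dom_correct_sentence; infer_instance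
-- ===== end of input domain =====

-- B replaces A's global capitalize() + index-correction loop by splitting the word list into
-- sentence chunks and formatting each sentence independently; on the D_ inputs below B
-- capitalizes the first word where A misses it.

-- Python str.capitalize(): first character uppercased, the rest lowercased (exact on the
-- ASCII domain, where title-case = upper-case). Shared primitive of both ports.
def pyCap (s : List Char) : List Char :=
  match s with
  | [] => []
  | c :: r => PySem.Chars.upperChar c :: PySem.Chars.lower r

-- ===== PORT A =====
-- transliteration of A, working charwise on text.toList
def correct_sentence (text : String) : String :=
  let t : List Char :=
    if PySem.Chars.endswith text.toList ['.'] = false then pyCap text.toList ++ ['.']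
    else pyCap text.toList
  let ws := PySem.Chars.split₀ t
  let ws2 := (List.range ws.length).foldl
    (fun ws i =>
      if decide (0 < i) && PySem.Chars.endswith (ws.getD (i - 1) []) ['.']
      then ws.set i (pyCap (ws.getD i []))
      else ws) ws
  String.ofList (PySem.Chars.join [' '] ws2)

-- ===== PORT B =====
-- Source B's outer while: cut the word list into sentence chunks, each ending at the first
-- word that ends with '.'; the inner 'while not words[k].endswith('.')' scan is the
-- takeWhile/dropWhile split at the first dot-ending word.  The [] branch of the inner
-- match is a totality guard only (in Python the inner while would run past the end there;
-- it is unreachable because the normalized text ends with '.').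
def csbChunks (ws : List (List Char)) : List (List (List Char)) :=
  match ws with
  | [] => []
  | w :: rest =>
    let p := (w :: rest).takeWhile (fun v => !PySem.Chars.endswith v ['.'])
    match h : (w :: rest).dropWhile (fun v => !PySem.Chars.endswith v ['.']) with
    | [] => [w :: rest]
    | d :: rest' => (p ++ [d]) :: csbChunks rest'
termination_by ws.length
decreasing_by
  have h1 := List.length_dropWhile_le (fun v => !PySem.Chars.endswith v ['.']) (w :: rest)
  rw [h] at h1
  simp only [List.length_cons] at h1 ⊢
  omega

-- Source B's per-sentence format: capitalize the first word, lowercase the rest, join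
def csbFmt (s : List (List Char)) : List Char :=
  match s with
  | [] => []
  | w :: r => PySem.Chars.join [' '] (pyCap w :: r.map PySem.Chars.lower)

-- transliteration of Source B: append '.' if missing, chunk into sentences, format each, join
def correct_sentence_alt (text : String) : String :=
  let t : List Char :=
    if PySem.Chars.endswith text.toList ['.'] = false then text.toList ++ ['.']
    else text.toList
  let sentences := csbChunks (PySem.Chars.split₀ t)
  String.ofList (PySem.Chars.join [' '] (sentences.map csbFmt))

-- ===== PRECONDITION & SPEC =====
-- On texts that begin with whitespace and whose first word starts with a letter, A's global
-- capitalize() hits the leading whitespace character and leaves the first word lowercased,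
-- while B capitalizes it; B's value is the intended sentence capitalization.
def D_correct_sentence (text : String) : Prop :=
  ((text.toList.head?.map PySem.Chars.isspace).getD false) = true ∧
  ((((text.toList.dropWhile (fun c => PySem.Chars.isspace c)).head?.map
      PySem.Chars.isalpha).getD false) = true)
instance (text : String) : Decidable (D_correct_sentence text) := by
  unfold D_correct_sentence; infer_instance

def Spec_correct_sentence (text : String) (out : String) : Prop :=
  ¬ D_correct_sentence text → out = correct_sentence_alt text
instance (text : String) (out : String) : Decidable (Spec_correct_sentence text out) := by
  unfold Spec_correct_sentence; infer_instance

def pvDiffWitness_correct_sentence : String := " ab"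
def pvDiffWitnessOut_correct_sentence : String × String := ("ab.", "Ab.")

-- ===== CLAIM (what is proved, stated in full; the proofs are below) =====
def Claim_unchanged_correct_sentence : Prop :=
  ∀ (text : String), Dom_correct_sentence text →
    Spec_correct_sentence text (correct_sentence text)
def Claim_changed_correct_sentence : Prop :=
  Dom_correct_sentence (pvDiffWitness_correct_sentence) ∧
  D_correct_sentence (pvDiffWitness_correct_sentence) ∧
  correct_sentence (pvDiffWitness_correct_sentence) = pvDiffWitnessOut_correct_sentence.1 ∧
  correct_sentence_alt (pvDiffWitness_correct_sentence) = pvDiffWitnessOut_correct_sentence.2 ∧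
  pvDiffWitnessOut_correct_sentence.1 ≠ pvDiffWitnessOut_correct_sentence.2
def Claim_exact_correct_sentence : Prop :=
  ∀ (text : String), Dom_correct_sentence text → D_correct_sentence text →
    correct_sentence text ≠ correct_sentence_alt text

-- ===== LEMMAS AND PROOFS =====

-- proof-side shortcuts
def pvLower : List Char → List Char := PySem.Chars.lower
def pvDot (w : List Char) : Bool := PySem.Chars.endswith w ['.']
def pvNS (c : Char) : Bool := !(PySem.Chars.isspace c)

-- ---- character facts ----
theorem pvUpper_iff (c : Char) :
    PySem.Chars.isupper c = true ↔ 65 ≤ c.toNat ∧ c.toNat ≤ 90 := by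
  simp only [PySem.Chars.isupper, Bool.and_eq_true, decide_eq_true_eq, Char.le_def,
    UInt32.le_iff_toNat_le]
  rfl

theorem pvLow_iff (c : Char) :
    PySem.Chars.islower c = true ↔ 97 ≤ c.toNat ∧ c.toNat ≤ 122 := by
  simp only [PySem.Chars.islower, Bool.and_eq_true, decide_eq_true_eq, Char.le_def,
    UInt32.le_iff_toNat_le]
  rfl

theorem pvSpace_iff (c : Char) :
    PySem.Chars.isspace c = true ↔
      (c.toNat = 32 ∨ (9 ≤ c.toNat ∧ c.toNat ≤ 13) ∨ (28 ≤ c.toNat ∧ c.toNat ≤ 31) ∨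
       c.toNat = 133 ∨ c.toNat = 160 ∨ c.toNat = 5760 ∨
       (8192 ≤ c.toNat ∧ c.toNat ≤ 8202) ∨ c.toNat = 8232 ∨ c.toNat = 8233 ∨
       c.toNat = 8239 ∨ c.toNat = 8287 ∨ c.toNat = 12288) := by
  simp only [PySem.Chars.isspace, Bool.or_eq_true, Bool.and_eq_true, decide_eq_true_eq]
  tauto

theorem pvEqChar_iff (c d : Char) : c = d ↔ c.toNat = d.toNat := by
  constructor
  · rintro rfl; rfl
  · intro h; exact Char.ext (UInt32.toNat_inj.mp h)

theorem pvToNat_ofNat (n : Nat) (h : n < 55296) : (Char.ofNat n).toNat = n := by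
  rw [Char.toNat_ofNat]
  simp [Nat.isValidChar, Or.inl h]

theorem pvToNat_lowerChar (c : Char) (h : PySem.Chars.isupper c = true) :
    (PySem.Chars.lowerChar c).toNat = c.toNat + 32 := by
  have hb := (pvUpper_iff c).1 h
  simp only [PySem.Chars.lowerChar, h, if_true]
  exact pvToNat_ofNat _ (by omega)

theorem pvToNat_upperChar (c : Char) (h : PySem.Chars.islower c = true) :
    (PySem.Chars.upperChar c).toNat = c.toNat - 32 := by
  have hb := (pvLow_iff c).1 h
  simp only [PySem.Chars.upperChar, h, if_true]
  exact pvToNat_ofNat _ (by omega)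

theorem pvLowerChar_id (c : Char) (h : PySem.Chars.isupper c = false) :
    PySem.Chars.lowerChar c = c := by
  simp [PySem.Chars.lowerChar, h]

theorem pvUpperChar_id (c : Char) (h : PySem.Chars.islower c = false) :
    PySem.Chars.upperChar c = c := by
  simp [PySem.Chars.upperChar, h]

theorem pvIsspace_lowerChar (c : Char) :
    PySem.Chars.isspace (PySem.Chars.lowerChar c) = PySem.Chars.isspace c := by
  cases h : PySem.Chars.isupper c with
  | false => rw [pvLowerChar_id c h]
  | true =>
    have hb := (pvUpper_iff c).1 h
    have ht := pvToNat_lowerChar c h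
    have h1 : PySem.Chars.isspace (PySem.Chars.lowerChar c) = false := by
      rw [Bool.eq_false_iff, Ne, pvSpace_iff, ht]; omega
    have h2 : PySem.Chars.isspace c = false := by
      rw [Bool.eq_false_iff, Ne, pvSpace_iff]; omega
    rw [h1, h2]

theorem pvIsspace_upperChar (c : Char) :
    PySem.Chars.isspace (PySem.Chars.upperChar c) = PySem.Chars.isspace c := by
  cases h : PySem.Chars.islower c with
  | false => rw [pvUpperChar_id c h]
  | true =>
    have hb := (pvLow_iff c).1 h
    have ht := pvToNat_upperChar c h
    have h1 : PySem.Chars.isspace (PySem.Chars.upperChar c) = false := by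
      rw [Bool.eq_false_iff, Ne, pvSpace_iff, ht]; omega
    have h2 : PySem.Chars.isspace c = false := by
      rw [Bool.eq_false_iff, Ne, pvSpace_iff]; omega
    rw [h1, h2]

theorem pvLowerChar_lowerChar (c : Char) :
    PySem.Chars.lowerChar (PySem.Chars.lowerChar c) = PySem.Chars.lowerChar c := by
  cases h : PySem.Chars.isupper c with
  | false => rw [pvLowerChar_id c h, pvLowerChar_id c h]
  | true =>
    have ht := pvToNat_lowerChar c h
    have hb := (pvUpper_iff c).1 h
    have hnu : PySem.Chars.isupper (PySem.Chars.lowerChar c) = false := by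
      rw [Bool.eq_false_iff, Ne, pvUpper_iff, ht]; omega
    exact pvLowerChar_id _ hnu

theorem pvUpperChar_lowerChar (c : Char) :
    PySem.Chars.upperChar (PySem.Chars.lowerChar c) = PySem.Chars.upperChar c := by
  cases h : PySem.Chars.isupper c with
  | false => rw [pvLowerChar_id c h]
  | true =>
    have ht := pvToNat_lowerChar c h
    have hb := (pvUpper_iff c).1 h
    have hl : PySem.Chars.islower (PySem.Chars.lowerChar c) = true := by
      rw [pvLow_iff, ht]; omega
    have hnl : PySem.Chars.islower c = false := by
      rw [Bool.eq_false_iff, Ne, pvLow_iff]; omega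
    rw [pvUpperChar_id c hnl, pvEqChar_iff, pvToNat_upperChar _ hl, ht]
    omega

theorem pvDotChar_toNat : ('.' : Char).toNat = 46 := by decide

theorem pvLowerChar_eq_dot (c : Char) :
    (PySem.Chars.lowerChar c = '.') ↔ (c = '.') := by
  cases h : PySem.Chars.isupper c with
  | false => rw [pvLowerChar_id c h]
  | true =>
    have ht := pvToNat_lowerChar c h
    have hb := (pvUpper_iff c).1 h
    rw [pvEqChar_iff, pvEqChar_iff c, ht, pvDotChar_toNat]
    omega

theorem pvUpperChar_eq_dot (c : Char) :
    (PySem.Chars.upperChar c = '.') ↔ (c = '.') := by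
  cases h : PySem.Chars.islower c with
  | false => rw [pvUpperChar_id c h]
  | true =>
    have ht := pvToNat_upperChar c h
    have hb := (pvLow_iff c).1 h
    rw [pvEqChar_iff, pvEqChar_iff c, ht, pvDotChar_toNat]
    omega

theorem pvCharNonalpha (c : Char) (h : PySem.Chars.isalpha c = false) :
    PySem.Chars.upperChar c = c ∧ PySem.Chars.lowerChar c = c := by
  have h1 : PySem.Chars.isupper c = false := by
    revert h; unfold PySem.Chars.isalpha; cases PySem.Chars.isupper c <;> simp
  have h2 : PySem.Chars.islower c = false := by
    revert h; unfold PySem.Chars.isalpha; cases PySem.Chars.islower c <;> simp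
  exact ⟨pvUpperChar_id c h2, pvLowerChar_id c h1⟩

theorem pvLowerChar_ne_upperChar (c : Char) (h : PySem.Chars.isalpha c = true) :
    PySem.Chars.lowerChar c ≠ PySem.Chars.upperChar c := by
  have h' : PySem.Chars.isupper c = true ∨ PySem.Chars.islower c = true := by
    revert h; unfold PySem.Chars.isalpha
    cases PySem.Chars.isupper c <;> cases PySem.Chars.islower c <;> simp
  rcases h' with h | h
  · have hb := (pvUpper_iff c).1 h
    have hnl : PySem.Chars.islower c = false := by
      rw [Bool.eq_false_iff, Ne, pvLow_iff]; omega
    rw [pvUpperChar_id c hnl, Ne, pvEqChar_iff, pvToNat_lowerChar c h]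
    omega
  · have hb := (pvLow_iff c).1 h
    have hnu : PySem.Chars.isupper c = false := by
      rw [Bool.eq_false_iff, Ne, pvUpper_iff]; omega
    rw [pvLowerChar_id c hnu, Ne, pvEqChar_iff, pvToNat_upperChar c h]
    omega

-- ---- endswith '.' = last char is '.' ----
theorem pvDot_eq_getLast (w : List Char) : pvDot w = (w.getLast? == some '.') := by
  rw [pvDot, PySem.Chars.endswith, List.getLast?_eq_head?_reverse, List.isSuffixOf]
  cases h : w.reverse with
  | nil => rfl
  | cons c r =>
    show (('.' == c) && List.isPrefixOf [] r) = (some c == some '.')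
    by_cases hc : c = '.'
    · subst hc
      simp [List.isPrefixOf]
    · have h2 : ¬ ('.' = c) := fun hh => hc hh.symm
      simp [hc, h2]

theorem pvDot_lower (w : List Char) : pvDot (pvLower w) = pvDot w := by
  rw [pvDot_eq_getLast, pvDot_eq_getLast, pvLower, PySem.Chars.lower, List.getLast?_map]
  cases h : w.getLast? with
  | none => rfl
  | some c =>
    simp only [Option.map_some]
    by_cases hc : c = '.'
    · simp [hc]
      decide
    · have hc2 : ¬ (PySem.Chars.lowerChar c = '.') := fun hh => hc ((pvLowerChar_eq_dot c).1 hh)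
      simp [hc, hc2]

theorem pvDot_cap (w : List Char) : pvDot (pyCap w) = pvDot w := by
  match w with
  | [] => rfl
  | [c] =>
    rw [pvDot_eq_getLast, pvDot_eq_getLast]
    show ([PySem.Chars.upperChar c].getLast? == some '.') = _
    simp only [List.getLast?_singleton]
    by_cases hc : c = '.'
    · simp [hc]
      decide
    · have hc2 : ¬ (PySem.Chars.upperChar c = '.') := fun hh => hc ((pvUpperChar_eq_dot c).1 hh)
      simp [hc, hc2]
  | c :: d :: r =>
    show pvDot (PySem.Chars.upperChar c :: PySem.Chars.lowerChar d :: PySem.Chars.lower r) = _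
    rw [pvDot_eq_getLast, pvDot_eq_getLast, List.getLast?_cons_cons, List.getLast?_cons_cons]
    have := pvDot_lower (d :: r)
    rw [pvDot_eq_getLast, pvDot_eq_getLast] at this
    exact this

theorem pvLower_lower (w : List Char) : pvLower (pvLower w) = pvLower w := by
  simp [pvLower, PySem.Chars.lower, List.map_map, Function.comp_def, pvLowerChar_lowerChar]

theorem pvCap_lower (w : List Char) : pyCap (pvLower w) = pyCap w := by
  match w with
  | [] => rfl
  | c :: r =>
    show pyCap (PySem.Chars.lowerChar c :: PySem.Chars.lower r) = _
    simp only [pyCap, pvUpperChar_lowerChar]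
    have : PySem.Chars.lower (PySem.Chars.lower r) = PySem.Chars.lower r := pvLower_lower r
    rw [this]

theorem pvCap_eq_lower_of_nonalpha (w : List Char) (c : Char)
    (hh : w.head? = some c) (h : PySem.Chars.isalpha c = false) :
    pyCap w = pvLower w := by
  match w with
  | [] => simp at hh
  | d :: r =>
    have hd : d = c := by simpa using hh
    rw [hd]
    obtain ⟨h1, h2⟩ := pvCharNonalpha c h
    show pyCap (c :: r) = PySem.Chars.lower (c :: r)
    rw [PySem.Chars.lower]
    simp only [pyCap, List.map_cons, h1, h2]
    rfl

-- ---- recursive description of split₀ (Python str.split()) ----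
def pvWords (s : List Char) : List (List Char) :=
  match s with
  | [] => []
  | c :: r =>
    if PySem.Chars.isspace c then pvWords r
    else (c :: r.takeWhile pvNS) :: pvWords (r.dropWhile pvNS)
termination_by s.length
decreasing_by
  all_goals
    have := List.length_dropWhile_le pvNS r
    simp only [List.length_cons]
    omega

theorem pvWords_cons_space (c : Char) (r : List Char)
    (hs : PySem.Chars.isspace c = true) : pvWords (c :: r) = pvWords r := by
  rw [pvWords]
  simp [hs]

theorem pvWords_cons_nonspace (c : Char) (r : List Char)
    (hs : PySem.Chars.isspace c = false) :
    pvWords (c :: r) = (c :: r.takeWhile pvNS) :: pvWords (r.dropWhile pvNS) := by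
  rw [pvWords]
  simp [hs]

def pvWordsAux (cur : List Char) (s : List Char) : List (List Char) :=
  match s with
  | [] => if cur.isEmpty then [] else [cur.reverse]
  | c :: r =>
    if PySem.Chars.isspace c then
      if cur.isEmpty then pvWordsAux [] r else cur.reverse :: pvWordsAux [] r
    else pvWordsAux (c :: cur) r

theorem pvGo_eq (s : List Char) : ∀ cur acc,
    PySem.Chars.split₀.go s cur acc = acc.reverse ++ pvWordsAux cur s := by
  induction s with
  | nil =>
    intro cur acc
    by_cases h : cur.isEmpty <;>
      simp [PySem.Chars.split₀.go, pvWordsAux, h]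
  | cons c r ih =>
    intro cur acc
    by_cases hs : PySem.Chars.isspace c
    · by_cases h : cur.isEmpty <;>
        simp [PySem.Chars.split₀.go, pvWordsAux, hs, h, ih]
    · simp [PySem.Chars.split₀.go, pvWordsAux, hs, ih]

theorem pvWordsAux_ne (s : List Char) : ∀ cur, cur ≠ [] →
    pvWordsAux cur s =
      (cur.reverse ++ s.takeWhile pvNS) :: pvWordsAux [] (s.dropWhile pvNS) := by
  induction s with
  | nil => intro cur h; simp [pvWordsAux, h]
  | cons c r ih =>
    intro cur h
    by_cases hs : PySem.Chars.isspace c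
    · simp [pvWordsAux, hs, h, pvNS]
    · simp only [pvWordsAux, hs, List.takeWhile_cons, List.dropWhile_cons, pvNS,
        Bool.not_eq_true']
      rw [ih (c :: cur) (by simp)]
      simp [hs]

theorem pvWordsAux_nil (s : List Char) : pvWordsAux [] s = pvWords s := by
  match s with
  | [] => simp [pvWordsAux, pvWords]
  | c :: r =>
    by_cases hs : PySem.Chars.isspace c
    · rw [pvWords_cons_space c r hs]
      simp only [pvWordsAux, hs, if_true, List.isEmpty_nil]
      exact pvWordsAux_nil r
    · rw [pvWords_cons_nonspace c r (by simp [hs])]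
      simp only [pvWordsAux, hs, if_false]
      rw [pvWordsAux_ne r [c] (by simp)]
      simp [pvWordsAux_nil (r.dropWhile pvNS)]
termination_by s.length
decreasing_by
  all_goals
    have := List.length_dropWhile_le pvNS r
    simp only [List.length_cons]
    omega

theorem pvSplit_eq_words (s : List Char) : PySem.Chars.split₀ s = pvWords s := by
  show PySem.Chars.split₀.go s [] [] = _
  rw [pvGo_eq]
  simp [pvWordsAux_nil]

theorem pvNS_lowerChar : (pvNS ∘ PySem.Chars.lowerChar) = pvNS := by
  funext c
  simp [pvNS, Function.comp, pvIsspace_lowerChar]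

theorem pvLower_cons (c : Char) (r : List Char) :
    pvLower (c :: r) = PySem.Chars.lowerChar c :: PySem.Chars.lower r := rfl

theorem pvTakeWhile_lower (r : List Char) :
    (PySem.Chars.lower r).takeWhile pvNS = PySem.Chars.lower (r.takeWhile pvNS) := by
  rw [PySem.Chars.lower, List.takeWhile_map, pvNS_lowerChar]
  rfl

theorem pvDropWhile_lower (r : List Char) :
    (PySem.Chars.lower r).dropWhile pvNS = PySem.Chars.lower (r.dropWhile pvNS) := by
  rw [PySem.Chars.lower, List.dropWhile_map, pvNS_lowerChar]
  rfl

theorem pvWords_lower (s : List Char) :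
    pvWords (pvLower s) = (pvWords s).map pvLower := by
  match s with
  | [] => simp [pvLower, PySem.Chars.lower, pvWords]
  | c :: r =>
    rw [pvLower_cons]
    cases hs : PySem.Chars.isspace c with
    | true =>
      rw [pvWords_cons_space _ _ (by rw [pvIsspace_lowerChar]; exact hs),
        pvWords_cons_space c r hs]
      exact pvWords_lower r
    | false =>
      rw [pvWords_cons_nonspace _ _ (by rw [pvIsspace_lowerChar]; exact hs),
        pvWords_cons_nonspace c r hs]
      rw [pvTakeWhile_lower, pvDropWhile_lower,
        show pvWords (PySem.Chars.lower (List.dropWhile pvNS r)) =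
          List.map pvLower (pvWords (List.dropWhile pvNS r)) from pvWords_lower _]
      simp only [List.map_cons, pvLower_cons]
termination_by s.length
decreasing_by
  all_goals
    have := List.length_dropWhile_le pvNS r
    simp only [List.length_cons]
    omega

theorem pvCap_append_dot (s : List Char) : pyCap s ++ ['.'] = pyCap (s ++ ['.']) := by
  match s with
  | [] =>
    show ['.'] = [PySem.Chars.upperChar '.']
    decide
  | c :: r =>
    show PySem.Chars.upperChar c :: (PySem.Chars.lower r ++ ['.']) =
      PySem.Chars.upperChar c :: PySem.Chars.lower (r ++ ['.'])
    rw [PySem.Chars.lower, PySem.Chars.lower, List.map_append]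
    have : List.map PySem.Chars.lowerChar ['.'] = ['.'] := by decide
    rw [this]

theorem pvWords_cap_space (c : Char) (r : List Char) (hs : PySem.Chars.isspace c = true) :
    pvWords (pyCap (c :: r)) = (pvWords (c :: r)).map pvLower := by
  have hnl : PySem.Chars.islower c = false := by
    have := (pvSpace_iff c).1 hs
    rw [Bool.eq_false_iff, Ne, pvLow_iff]; omega
  have hu : PySem.Chars.upperChar c = c := pvUpperChar_id c hnl
  show pvWords (PySem.Chars.upperChar c :: PySem.Chars.lower r) = _
  rw [hu, pvWords_cons_space _ _ hs, pvWords_cons_space c r hs]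
  exact pvWords_lower r

theorem pvWords_cap_nonspace (c : Char) (r : List Char)
    (hs : PySem.Chars.isspace c = false) :
    pvWords (pyCap (c :: r)) =
      pyCap (c :: r.takeWhile pvNS) :: (pvWords (r.dropWhile pvNS)).map pvLower := by
  show pvWords (PySem.Chars.upperChar c :: PySem.Chars.lower r) = _
  rw [pvWords_cons_nonspace _ _ (by rw [pvIsspace_upperChar]; exact hs)]
  rw [pvTakeWhile_lower, pvDropWhile_lower,
    show pvWords (PySem.Chars.lower (List.dropWhile pvNS r)) =
      List.map pvLower (pvWords (List.dropWhile pvNS r)) from pvWords_lower _]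
  rfl

theorem pvWords_head (s : List Char) : ∀ (w : List Char) (ws : List (List Char)),
    pvWords s = w :: ws →
    w.head? = (s.dropWhile (fun c => PySem.Chars.isspace c)).head? := by
  match s with
  | [] => intro w ws h; simp [pvWords] at h
  | c :: r =>
    intro w ws h
    cases hs : PySem.Chars.isspace c with
    | true =>
      rw [pvWords_cons_space c r hs] at h
      rw [List.dropWhile_cons]
      simp only [hs, if_true]
      exact pvWords_head r w ws h
    | false =>
      rw [pvWords_cons_nonspace c r hs] at h
      simp only [List.cons.injEq] at h
      rw [List.dropWhile_cons]
      simp only [hs, Bool.false_eq_true, if_false]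
      rw [← h.1]
      rfl
termination_by s.length
decreasing_by
  simp

theorem pvWords_nil_iff (s : List Char) :
    pvWords s = [] ↔ s.dropWhile (fun c => PySem.Chars.isspace c) = [] := by
  match s with
  | [] => simp [pvWords]
  | c :: r =>
    cases hs : PySem.Chars.isspace c with
    | true =>
      rw [pvWords_cons_space c r hs, List.dropWhile_cons]
      simp only [hs, if_true]
      exact pvWords_nil_iff r
    | false =>
      rw [pvWords_cons_nonspace c r hs, List.dropWhile_cons]
      simp [hs]
termination_by s.length
decreasing_by
  simp

-- ---- the target word transformation both ports compute ----
def pvMwf : Bool → List (List Char) → List (List Char)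
  | _, [] => []
  | b, w :: ws => (if b then pyCap w else pvLower w) :: pvMwf (pvDot w) ws

theorem pvMwf_cons (b : Bool) (w : List Char) (ws : List (List Char)) :
    pvMwf b (w :: ws) = (if b then pyCap w else pvLower w) :: pvMwf (pvDot w) ws := rfl

-- ---- A's loop ----
def pvAGo (p : List Char) : List (List Char) → List (List Char)
  | [] => []
  | w :: ws => (if pvDot p then pyCap w else w) :: pvAGo w ws

def pvASpec (ws : List (List Char)) : List (List Char) :=
  match ws with
  | [] => []
  | w :: ws => w :: pvAGo w ws

theorem pvAGo_length (p : List Char) (ws : List (List Char)) :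
    (pvAGo p ws).length = ws.length := by
  induction ws generalizing p with
  | nil => rfl
  | cons w ws ih => simp [pvAGo, ih]

theorem pvASpec_length (ws : List (List Char)) : (pvASpec ws).length = ws.length := by
  match ws with
  | [] => rfl
  | w :: ws => simp [pvASpec, pvAGo_length]

theorem pvAGo_getElem (ws : List (List Char)) : ∀ (p : List Char) (i : Nat)
    (h : i < ws.length),
    (pvAGo p ws)[i]'(by rw [pvAGo_length]; exact h) =
      if pvDot ((p :: ws)[i]'(by simp; omega)) then pyCap (ws[i]'h) else ws[i]'h := by
  induction ws with
  | nil => intro p i h; simp at h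
  | cons w ws ih =>
    intro p i h
    match i with
    | 0 => simp [pvAGo]
    | i + 1 =>
      have hi : i < ws.length := by simp at h; omega
      show (pvAGo w ws)[i]'(by rw [pvAGo_length]; exact hi) = _
      rw [ih w i hi]
      rfl

theorem pvASpec_getElem (W : List (List Char)) (i : Nat) (h : i < W.length) :
    (pvASpec W)[i]'(by rw [pvASpec_length]; exact h) =
      if 0 < i then
        (if pvDot (W[i - 1]'(by omega)) then pyCap (W[i]'h) else W[i]'h)
      else W[i]'h := by
  match W with
  | [] => simp at h
  | w :: ws =>
    match i with
    | 0 => simp [pvASpec]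
    | i + 1 =>
      have hi : i < ws.length := by simp at h; omega
      show (pvAGo w ws)[i]'(by rw [pvAGo_length]; exact hi) = _
      rw [pvAGo_getElem ws w i hi]
      simp

theorem pvASpec_dot (W : List (List Char)) (i : Nat) (h : i < W.length) :
    pvDot ((pvASpec W)[i]'(by rw [pvASpec_length]; exact h)) = pvDot (W[i]'h) := by
  rw [pvASpec_getElem W i h]
  split_ifs with h1 h2
  · exact pvDot_cap _
  · rfl
  · rfl

theorem pvA_inv (W : List (List Char)) : ∀ k, k ≤ W.length →
    (List.range k).foldl
      (fun ws i =>
        if decide (0 < i) && PySem.Chars.endswith (ws.getD (i - 1) []) ['.']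
        then ws.set i (pyCap (ws.getD i []))
        else ws) W = (pvASpec W).take k ++ W.drop k := by
  intro k
  induction k with
  | zero => intro _; simp
  | succ k ih =>
    intro hk
    have hkl : k < W.length := by omega
    have hkA : k < (pvASpec W).length := by rw [pvASpec_length]; exact hkl
    rw [List.range_succ, List.foldl_append, ih (by omega)]
    simp only [List.foldl_cons, List.foldl_nil]
    have hlen : ((pvASpec W).take k).length = k := by
      rw [List.length_take]; omega
    have hgetk : ((pvASpec W).take k ++ W.drop k).getD k [] = W[k]'hkl := by
      rw [List.getD_append_right _ _ _ _ (by omega), hlen]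
      simp only [Nat.sub_self]
      rw [List.getD_eq_getElem _ _ (by simp; omega)]
      simp
    have hdropk : W.drop k = (W[k]'hkl) :: W.drop (k + 1) :=
      List.drop_eq_getElem_cons hkl
    by_cases h0 : 0 < k
    · have hk1 : k - 1 < k := by omega
      have hget : ((pvASpec W).take k ++ W.drop k).getD (k - 1) [] =
          (pvASpec W)[k - 1]'(by omega) := by
        rw [List.getD_append _ _ _ _ (by omega),
          List.getD_eq_getElem _ _ (by omega)]
        simp [List.getElem_take]
      have hdot : PySem.Chars.endswith
          (((pvASpec W).take k ++ W.drop k).getD (k - 1) []) ['.'] =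
          pvDot (W[k - 1]'(by omega)) := by
        rw [hget]
        exact pvASpec_dot W (k - 1) (by omega)
      rw [hdot]
      have htk : (pvASpec W).take (k + 1) =
          (pvASpec W).take k ++ [(pvASpec W)[k]'hkA] := by
        rw [List.take_succ]
        simp [List.getElem?_eq_getElem hkA]
      by_cases hD : pvDot (W[k - 1]'(by omega)) = true
      · simp only [h0, decide_true, hD, Bool.and_self, if_true]
        rw [hgetk, List.set_append, if_neg (by omega), hlen]
        rw [hdropk]
        simp only [Nat.sub_self, List.set_cons_zero]
        rw [htk]
        rw [pvASpec_getElem W k hkl]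
        simp [h0, hD]
      · simp only [h0, decide_true, Bool.true_and, hD, if_false]
        rw [htk]
        rw [pvASpec_getElem W k hkl]
        simp only [h0, if_true, hD, if_false]
        rw [hdropk]
        simp
    · have hk0 : k = 0 := by omega
      subst hk0
      simp only [Nat.lt_irrefl, decide_false, Bool.false_and, if_false]
      have htk : (pvASpec W).take 1 = [(pvASpec W)[0]'hkA] := by
        rw [List.take_succ]
        simp [List.getElem?_eq_getElem hkA]
      rw [htk, pvASpec_getElem W 0 hkl]
      simp only [Nat.lt_irrefl, if_false]
      rw [hdropk]
      simp

theorem pvA_loop (W : List (List Char)) :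
    (List.range W.length).foldl
      (fun ws i =>
        if decide (0 < i) && PySem.Chars.endswith (ws.getD (i - 1) []) ['.']
        then ws.set i (pyCap (ws.getD i []))
        else ws) W = pvASpec W := by
  rw [pvA_inv W W.length (le_refl _)]
  simp [pvASpec_length]

theorem pvAGo_mwf (ws : List (List Char)) : ∀ p q, pvDot p = pvDot q →
    pvAGo p (ws.map pvLower) = pvMwf (pvDot q) ws := by
  induction ws with
  | nil => intro p q h; rfl
  | cons w ws ih =>
    intro p q h
    show (if pvDot p then pyCap (pvLower w) else pvLower w) ::
        pvAGo (pvLower w) (ws.map pvLower) = _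
    rw [pvMwf_cons, ih (pvLower w) w (pvDot_lower w), h, pvCap_lower]

-- ---- B's chunking loop equals pvMwf ----
-- the per-chunk word transformation (csbFmt before joining)
def pvTrans (s : List (List Char)) : List (List Char) :=
  match s with
  | [] => []
  | w :: r => pyCap w :: r.map PySem.Chars.lower

theorem pvMwf_false_all_nondot (ws : List (List Char))
    (h : ∀ v ∈ ws, pvDot v = false) : pvMwf false ws = ws.map pvLower := by
  induction ws with
  | nil => rfl
  | cons w ws ih =>
    rw [pvMwf_cons, h w (by simp), if_neg (by simp)]
    rw [ih (fun v hv => h v (by simp [hv]))]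
    rfl

theorem pvMwf_false_chunk (rest' : List (List Char)) (d : List Char)
    (hd : pvDot d = true) : ∀ p : List (List Char), (∀ v ∈ p, pvDot v = false) →
    pvMwf false (p ++ d :: rest') = p.map pvLower ++ pvLower d :: pvMwf true rest' := by
  intro p
  induction p with
  | nil =>
    intro _
    rw [List.nil_append, pvMwf_cons, hd, if_neg (by simp)]
    rfl
  | cons w p' ih =>
    intro hp
    rw [List.cons_append, pvMwf_cons, hp w (by simp), if_neg (by simp)]
    rw [ih (fun v hv => hp v (by simp [hv]))]
    rfl

theorem pvMwf_true_chunk (rest' : List (List Char)) (d : List Char)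
    (hd : pvDot d = true) (p : List (List Char)) (hp : ∀ v ∈ p, pvDot v = false) :
    pvMwf true (p ++ d :: rest') = pvTrans (p ++ [d]) ++ pvMwf true rest' := by
  match p with
  | [] =>
    rw [List.nil_append, pvMwf_cons, if_pos rfl, hd]
    rfl
  | w :: p' =>
    rw [List.cons_append, pvMwf_cons, if_pos rfl, hp w (by simp),
      pvMwf_false_chunk rest' d hd p' (fun v hv => hp v (by simp [hv]))]
    show pyCap w :: (p'.map pvLower ++ pvLower d :: pvMwf true rest') =
      (pyCap w :: (p' ++ [d]).map PySem.Chars.lower) ++ pvMwf true rest'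
    rw [List.map_append]
    simp [pvLower]

theorem pvDropWhileHead {α : Type} (p : α → Bool) (l : List α) (d : α) (r : List α)
    (h : l.dropWhile p = d :: r) : p d = false := by
  induction l with
  | nil => simp at h
  | cons a t ih =>
    rw [List.dropWhile_cons] at h
    by_cases hp : p a = true
    · rw [if_pos hp] at h; exact ih h
    · rw [if_neg hp] at h
      have : a = d := (List.cons.injEq _ _ _ _ ▸ h).1
      rw [← this]
      simpa using hp

theorem pvChunks_trans_flatten (ws : List (List Char)) :
    ((csbChunks ws).map pvTrans).flatten = pvMwf true ws := by
  match ws with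
  | [] => simp [csbChunks, pvMwf]
  | w :: rest =>
    rw [csbChunks]
    have hp : ∀ v ∈ (w :: rest).takeWhile (fun v => !PySem.Chars.endswith v ['.']),
        pvDot v = false := by
      intro v hv
      have := List.mem_takeWhile_imp hv
      simpa [pvDot] using this
    match hdw : (w :: rest).dropWhile (fun v => !PySem.Chars.endswith v ['.']) with
    | [] =>
      have hall : ∀ v ∈ (w :: rest), pvDot v = false := by
        intro v hv
        have := List.dropWhile_eq_nil_iff.mp hdw v hv
        simpa [pvDot] using this
      show pvTrans (w :: rest) ++ [] = pvMwf true (w :: rest)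
      rw [List.append_nil, pvMwf_cons, if_pos rfl]
      have hw : pvDot w = false := hall w (by simp)
      rw [hw, pvMwf_false_all_nondot rest (fun v hv => hall v (by simp [hv]))]
      rfl
    | d :: rest' =>
      have hsplit : (w :: rest) =
          (w :: rest).takeWhile (fun v => !PySem.Chars.endswith v ['.']) ++ d :: rest' := by
        conv_lhs => rw [← List.takeWhile_append_dropWhile
          (p := fun v => !PySem.Chars.endswith v ['.']) (l := w :: rest)]
        rw [hdw]
      have hd : pvDot d = true := by
        have := pvDropWhileHead _ _ _ _ hdw
        simpa [pvDot] using this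
      show pvTrans ((w :: rest).takeWhile (fun v => !PySem.Chars.endswith v ['.']) ++ [d]) ++
          ((csbChunks rest').map pvTrans).flatten = pvMwf true (w :: rest)
      rw [pvChunks_trans_flatten rest']
      conv_rhs => rw [hsplit]
      exact (pvMwf_true_chunk rest' d hd _ hp).symm
termination_by ws.length
decreasing_by
  have h1 := List.length_dropWhile_le (fun v => !PySem.Chars.endswith v ['.']) (w :: rest)
  rw [hdw] at h1
  simp only [List.length_cons] at h1 ⊢
  omega

-- ---- joining: sentence-wise join = flat join ----
def pvJoinR (s : List Char) : List (List Char) → List Char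
  | [] => []
  | [a] => a
  | a :: b :: l => a ++ s ++ pvJoinR s (b :: l)

theorem pvJoin_eq_joinR (s : List Char) (l : List (List Char)) :
    PySem.Chars.join s l = pvJoinR s l := by
  match l with
  | [] => rfl
  | [a] => simp [PySem.Chars.join, List.intercalate, pvJoinR]
  | a :: b :: l =>
    have ih := pvJoin_eq_joinR s (b :: l)
    show List.intercalate s (a :: b :: l) = _
    rw [pvJoinR]
    rw [← ih]
    show (List.intersperse s (a :: b :: l)).flatten = _
    rw [List.intersperse_cons₂]
    show a ++ (s ++ (List.intersperse s (b :: l)).flatten) = _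
    show a ++ (s ++ List.intercalate s (b :: l)) = _
    rw [List.append_assoc]
    rfl

theorem pvJoinR_append (s : List Char) (c l : List (List Char))
    (hc : c ≠ []) (hl : l ≠ []) :
    pvJoinR s (c ++ l) = pvJoinR s c ++ s ++ pvJoinR s l := by
  match c with
  | [] => exact absurd rfl hc
  | [a] =>
    match l with
    | [] => exact absurd rfl hl
    | x :: xs =>
      show pvJoinR s (a :: x :: xs) = _
      rw [pvJoinR]
      rfl
  | a :: b :: c' =>
    show pvJoinR s (a :: b :: (c' ++ l)) = _
    rw [pvJoinR]
    have ih2 := pvJoinR_append s (b :: c') l (by simp) hl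
    rw [List.cons_append] at ih2
    rw [ih2]
    show a ++ s ++ (pvJoinR s (b :: c') ++ s ++ pvJoinR s l) = _
    rw [pvJoinR]
    simp [List.append_assoc]

theorem pvJoinR_flatten (s : List Char) (css : List (List (List Char)))
    (h : ∀ c ∈ css, c ≠ []) :
    pvJoinR s (css.map (pvJoinR s)) = pvJoinR s css.flatten := by
  match css with
  | [] => rfl
  | [c] =>
    show pvJoinR s [pvJoinR s c] = pvJoinR s (c ++ [])
    rw [List.append_nil]
    rfl
  | c :: c' :: rest =>
    have hc : c ≠ [] := h c (by simp)
    have hfl : (c' :: rest).flatten ≠ [] := by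
      have hc' : c' ≠ [] := h c' (by simp)
      rw [List.flatten_cons]
      intro hh
      exact hc' (List.append_eq_nil_iff.mp hh).1
    show pvJoinR s (pvJoinR s c :: (c' :: rest).map (pvJoinR s)) = _
    have ih := pvJoinR_flatten s (c' :: rest) (fun x hx => h x (by simp [hx]))
    rw [show (pvJoinR s c :: (c' :: rest).map (pvJoinR s)) =
        [pvJoinR s c] ++ (c' :: rest).map (pvJoinR s) from rfl]
    rw [pvJoinR_append s [pvJoinR s c] ((c' :: rest).map (pvJoinR s)) (by simp) (by simp)]
    rw [ih]
    show pvJoinR s [pvJoinR s c] ++ s ++ pvJoinR s (c' :: rest).flatten = _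
    rw [show pvJoinR s [pvJoinR s c] = pvJoinR s c from rfl]
    rw [show (c :: c' :: rest).flatten = c ++ (c' :: rest).flatten from List.flatten_cons]
    rw [pvJoinR_append s c ((c' :: rest).flatten) hc hfl]

theorem pvChunks_nonempty (ws : List (List Char)) :
    ∀ c ∈ csbChunks ws, c ≠ [] := by
  match ws with
  | [] => intro c hc; simp [csbChunks] at hc
  | w :: rest =>
    intro c hc
    rw [csbChunks] at hc
    revert hc
    match hdw : (w :: rest).dropWhile (fun v => !PySem.Chars.endswith v ['.']) with
    | [] =>
      intro hc
      simp only [List.mem_singleton] at hc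
      rw [hc]
      simp
    | d :: rest' =>
      intro hc
      simp only [List.mem_cons] at hc
      rcases hc with hc | hc
      · rw [hc]; simp
      · exact pvChunks_nonempty rest' c hc
termination_by ws.length
decreasing_by
  have h1 := List.length_dropWhile_le (fun v => !PySem.Chars.endswith v ['.']) (w :: rest)
  rw [hdw] at h1
  simp only [List.length_cons] at h1 ⊢
  omega

theorem pvFmt_eq_join_trans (c : List (List Char)) :
    csbFmt c = PySem.Chars.join [' '] (pvTrans c) := by
  match c with
  | [] => rfl
  | w :: r => rfl

theorem pvTrans_ne (c : List (List Char)) (h : c ≠ []) : pvTrans c ≠ [] := by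
  match c with
  | [] => exact absurd rfl h
  | w :: r => simp [pvTrans]

theorem pvB_join (W : List (List Char)) :
    PySem.Chars.join [' '] ((csbChunks W).map csbFmt) =
      PySem.Chars.join [' '] (pvMwf true W) := by
  have h1 : (csbChunks W).map csbFmt =
      ((csbChunks W).map pvTrans).map (PySem.Chars.join [' ']) := by
    rw [List.map_map]
    exact List.map_congr_left (fun c _ => pvFmt_eq_join_trans c)
  rw [h1, pvJoin_eq_joinR, pvJoin_eq_joinR]
  have h2 : ((csbChunks W).map pvTrans).map (PySem.Chars.join [' ']) =
      ((csbChunks W).map pvTrans).map (pvJoinR [' ']) :=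
    List.map_congr_left (fun c _ => pvJoin_eq_joinR [' '] c)
  rw [h2]
  rw [pvJoinR_flatten [' '] ((csbChunks W).map pvTrans)
    (by
      intro c hc
      obtain ⟨x, hx, hxc⟩ := List.mem_map.mp hc
      rw [← hxc]
      exact pvTrans_ne x (pvChunks_nonempty W x hx))]
  rw [pvChunks_trans_flatten]

-- head of a join
theorem pvJoin_cons (w : List Char) (ws : List (List Char)) :
    ∃ t, PySem.Chars.join [' '] (w :: ws) = w ++ t := by
  cases ws with
  | nil => exact ⟨[], by simp [PySem.Chars.join, List.intercalate]⟩
  | cons v vs =>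
    refine ⟨' ' :: List.intercalate [' '] (v :: vs), ?_⟩
    simp [PySem.Chars.join, List.intercalate, List.intersperse]

-- core agreement: the word lists of A and B, under the no-quirk hypothesis H
theorem pvCore (t' : List Char) (hne : t' ≠ [])
    (H : ∀ c d, t'.head? = some c → PySem.Chars.isspace c = true →
         (t'.dropWhile (fun c => PySem.Chars.isspace c)).head? = some d →
         PySem.Chars.isalpha d = false) :
    pvASpec (pvWords (pyCap t')) = pvMwf true (pvWords t') := by
  match t' with
  | [] => exact absurd rfl hne
  | c :: r =>
    cases hs : PySem.Chars.isspace c with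
    | true =>
      rw [pvWords_cap_space c r hs]
      match hw : pvWords (c :: r) with
      | [] => rfl
      | w0 :: rest =>
        have hA : pvASpec (pvLower w0 :: rest.map pvLower) =
            pvLower w0 :: pvMwf (pvDot w0) rest := by
          show pvLower w0 :: pvAGo (pvLower w0) (rest.map pvLower) = _
          rw [pvAGo_mwf rest (pvLower w0) w0 (pvDot_lower w0)]
        have hB : pvMwf true (w0 :: rest) = pyCap w0 :: pvMwf (pvDot w0) rest := by
          rw [pvMwf_cons]
          simp
        show pvASpec (pvLower w0 :: rest.map pvLower) = pvMwf true (w0 :: rest)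
        rw [hA, hB]
        have hhead : w0.head? =
            ((c :: r).dropWhile (fun c => PySem.Chars.isspace c)).head? :=
          pvWords_head (c :: r) w0 rest hw
        have hcl : pyCap w0 = pvLower w0 := by
          match hd : ((c :: r).dropWhile (fun c => PySem.Chars.isspace c)).head? with
          | none =>
            rw [hd] at hhead
            match w0 with
            | [] => rfl
            | _ :: _ => simp at hhead
          | some d =>
            rw [hd] at hhead
            exact pvCap_eq_lower_of_nonalpha w0 d hhead (H c d rfl hs hd)
        rw [hcl]
    | false =>
      rw [pvWords_cap_nonspace c r hs, pvWords_cons_nonspace c r hs]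
      show pyCap (c :: r.takeWhile pvNS) ::
          pvAGo (pyCap (c :: r.takeWhile pvNS)) ((pvWords (r.dropWhile pvNS)).map pvLower) = _
      rw [pvMwf_cons, pvAGo_mwf _ _ (c :: r.takeWhile pvNS) (pvDot_cap _)]
      simp

theorem pvMain (text : String) (hD : ¬ D_correct_sentence text) :
    pvASpec (pvWords (pyCap
      (if PySem.Chars.endswith text.toList ['.'] = false
       then text.toList ++ ['.'] else text.toList))) =
    pvMwf true (pvWords
      (if PySem.Chars.endswith text.toList ['.'] = false
       then text.toList ++ ['.'] else text.toList)) := by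
  by_cases hb : PySem.Chars.endswith text.toList ['.'] = false
  · rw [if_pos hb]
    apply pvCore _ (by simp)
    intro c d hc hsp hd
    match htl : text.toList with
    | [] =>
      rw [htl] at hc
      simp only [List.nil_append, List.head?_cons, Option.some.injEq] at hc
      rw [← hc] at hsp
      exact absurd ((pvSpace_iff '.').1 hsp) (by decide)
    | c0 :: r0 =>
      rw [htl] at hc
      simp only [List.cons_append, List.head?_cons, Option.some.injEq] at hc
      rw [htl, List.dropWhile_append] at hd
      by_cases hemp : ((c0 :: r0).dropWhile (fun c => PySem.Chars.isspace c)).isEmpty = true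
      · rw [if_pos hemp] at hd
        have hdd : '.' = d := by
          simp only [List.dropWhile_cons] at hd
          rw [if_neg (by simp; decide)] at hd
          simpa using hd
        rw [← hdd]
        decide
      · rw [if_neg hemp] at hd
        by_contra hal
        apply hD
        constructor
        · rw [htl]
          simp only [List.head?_cons, Option.map_some]
          rw [hc]
          simp [hsp]
        · rw [htl]
          match hdw : (c0 :: r0).dropWhile (fun c => PySem.Chars.isspace c) with
          | [] => rw [hdw] at hemp; simp at hemp
          | e :: ee =>
            rw [hdw] at hd
            simp only [List.cons_append, List.head?_cons, Option.some.injEq] at hd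
            simp only [List.head?_cons, Option.map_some, Option.getD_some]
            rw [hd]
            simpa using hal
  · rw [if_neg hb]
    have hne : text.toList ≠ [] := by
      intro hnil
      apply hb
      rw [hnil]
      decide
    apply pvCore _ hne
    intro c d hc hsp hd
    by_contra hal
    apply hD
    constructor
    · rw [hc]
      simp [hsp]
    · rw [hd]
      simpa using hal

-- unfolding both ports to word lists
theorem pvA_eq (text : String) :
    correct_sentence text = String.ofList (PySem.Chars.join [' ']
      (pvASpec (pvWords (pyCap
        (if PySem.Chars.endswith text.toList ['.'] = false
         then text.toList ++ ['.'] else text.toList))))) := by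
  by_cases hb : PySem.Chars.endswith text.toList ['.'] = false
  · simp only [correct_sentence, if_pos hb]
    rw [pvCap_append_dot, pvSplit_eq_words, pvA_loop]
  · simp only [correct_sentence, if_neg hb]
    rw [pvSplit_eq_words, pvA_loop]

-- B's port with only structurally recursive functions on the right (used to evaluate
-- the witness in correct_sentence_changed: csbChunks is well-founded recursion, which
-- `decide` cannot reduce)
theorem pvB_eval (text : String) :
    correct_sentence_alt text = String.ofList (PySem.Chars.join [' ']
      (pvMwf true (PySem.Chars.split₀
        (if PySem.Chars.endswith text.toList ['.'] = false
         then text.toList ++ ['.'] else text.toList)))) := by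
  simp only [correct_sentence_alt]
  rw [pvB_join]

theorem pvB_eq (text : String) :
    correct_sentence_alt text = String.ofList (PySem.Chars.join [' ']
      (pvMwf true (pvWords
        (if PySem.Chars.endswith text.toList ['.'] = false
         then text.toList ++ ['.'] else text.toList)))) := by
  rw [pvB_eval, pvSplit_eq_words]

theorem pvJoin_head (a : Char) (w : List Char) (ws : List (List Char)) :
    (PySem.Chars.join [' '] ((a :: w) :: ws)).head? = some a := by
  obtain ⟨t, ht⟩ := pvJoin_cons (a :: w) ws
  rw [ht]
  simp

theorem pvTightCore (c : Char) (r : List Char) (d : Char)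
    (hs : PySem.Chars.isspace c = true)
    (hd : ((c :: r).dropWhile (fun c => PySem.Chars.isspace c)).head? = some d)
    (hal : PySem.Chars.isalpha d = true) :
    String.ofList (PySem.Chars.join [' '] (pvASpec (pvWords (pyCap (c :: r))))) ≠
    String.ofList (PySem.Chars.join [' '] (pvMwf true (pvWords (c :: r)))) := by
  rw [pvWords_cap_space c r hs]
  obtain ⟨w0, rest, hw⟩ : ∃ w0 rest, pvWords (c :: r) = w0 :: rest := by
    match hwn : pvWords (c :: r) with
    | [] =>
      rw [pvWords_nil_iff] at hwn
      rw [hwn] at hd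
      simp at hd
    | w0 :: rest => exact ⟨w0, rest, rfl⟩
  rw [hw]
  have hhead : w0.head? = some d := by
    rw [pvWords_head (c :: r) w0 rest hw]
    exact hd
  obtain ⟨w0t, hw0⟩ : ∃ w0t, w0 = d :: w0t := by
    match w0, hhead with
    | d0 :: w0t, hhead =>
      have hd0 : d0 = d := by simpa using hhead
      exact ⟨w0t, by rw [hd0]⟩
  subst hw0
  have hA : pvASpec (((d :: w0t) :: rest).map pvLower) =
      (PySem.Chars.lowerChar d :: PySem.Chars.lower w0t) ::
        pvMwf (pvDot (d :: w0t)) rest := by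
    simp only [List.map_cons]
    show pvLower (d :: w0t) :: pvAGo (pvLower (d :: w0t)) (rest.map pvLower) = _
    rw [pvAGo_mwf rest _ _ (pvDot_lower _)]
    rfl
  have hB : pvMwf true ((d :: w0t) :: rest) =
      (PySem.Chars.upperChar d :: PySem.Chars.lower w0t) ::
        pvMwf (pvDot (d :: w0t)) rest := by
    rw [pvMwf_cons]
    simp only [if_true]
    rfl
  rw [hA, hB]
  intro h
  have hlist := congrArg String.toList h
  simp only [String.toList_ofList] at hlist
  have hh := congrArg List.head? hlist
  rw [pvJoin_head, pvJoin_head] at hh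
  simp only [Option.some.injEq] at hh
  exact pvLowerChar_ne_upperChar d hal hh

-- ===== VERDICT =====
theorem correct_sentence_spec : Claim_unchanged_correct_sentence := by
  intro text _ hD
  rw [pvA_eq, pvB_eq, pvMain text hD]

theorem correct_sentence_changed : Claim_changed_correct_sentence := by
  unfold Claim_changed_correct_sentence
  refine ⟨by decide, by decide, by decide, ?_, by decide⟩
  rw [pvB_eval]
  decide

theorem correct_sentence_tight : Claim_exact_correct_sentence := by
  intro text _ hD
  obtain ⟨hD1, hD2⟩ := hD
  match htl : text.toList with
  | [] => rw [htl] at hD1; simp at hD1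
  | c0 :: r0 =>
    rw [htl] at hD1 hD2
    simp only [List.head?_cons, Option.map_some, Option.getD_some] at hD1
    match hdw : (c0 :: r0).dropWhile (fun c => PySem.Chars.isspace c) with
    | [] => rw [hdw] at hD2; simp at hD2
    | d :: dd =>
      rw [hdw] at hD2
      simp only [List.head?_cons, Option.map_some, Option.getD_some] at hD2
      rw [pvA_eq, pvB_eq, htl]
      by_cases hb : PySem.Chars.endswith (c0 :: r0) ['.'] = false
      · rw [if_pos hb]
        have hcons : (c0 :: r0) ++ ['.'] = c0 :: (r0 ++ ['.']) := by simp
        rw [hcons]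
        apply pvTightCore c0 (r0 ++ ['.']) d hD1 _ hD2
        rw [← hcons]
        show ((List.dropWhile (fun c => PySem.Chars.isspace c) ((c0 :: r0) ++ ['.']))).head? =
          some d
        rw [List.dropWhile_append, if_neg (by rw [hdw]; simp), hdw]
        simp
      · rw [if_neg hb]
        exact pvTightCore c0 r0 d hD1 (by rw [hdw]; simp) hD2
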